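-- pv_equiv track=rewrite | github.com/DavidLee95/ai_tic_tac_toe | functions.py | coordinate_converter
-- ===== SOURCE A (Python) =====
-- def coordinate_converter(x_coord, y_coord):
--
--     # Starting positions where the lines were drawn
--     range = [110,270,430]
--
--     # Assign a non-existent board value if the user clicks outside the board
--     i_coord = 50
--     j_coord = 50
--
--     # Get the i coordinate from 0 to 2
--     for i, value in enumerate(range):
--         if value <= x_coord <= value + 159:
--             i_coord = i
--
--     # Get the j coordinate from 0 to 2
--     for i, value in enumerate(range):
--         if value <= y_coord <= value + 159:
--             j_coord = i
--
--     return i_coord,j_coord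
-- ===== SOURCE B (Python) =====
-- def _cell(c):
--     # closed-form: board spans [110, 589] in three contiguous 160-wide cells
--     if 110 <= c <= 589:
--         return (c - 110) // 160
--     return 50
--
-- def coordinate_converter(x_coord, y_coord):
--     return _cell(x_coord), _cell(y_coord)
-- ===== Notes on version B (the rewrite author's own statement) =====
-- stated objective: simpler
-- what changed: Replaces the two enumerate-scans over the line-start list with a closed-form per-coordinate helper: bounds check plus integer division (c-110)//160.
import Mathlib
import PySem

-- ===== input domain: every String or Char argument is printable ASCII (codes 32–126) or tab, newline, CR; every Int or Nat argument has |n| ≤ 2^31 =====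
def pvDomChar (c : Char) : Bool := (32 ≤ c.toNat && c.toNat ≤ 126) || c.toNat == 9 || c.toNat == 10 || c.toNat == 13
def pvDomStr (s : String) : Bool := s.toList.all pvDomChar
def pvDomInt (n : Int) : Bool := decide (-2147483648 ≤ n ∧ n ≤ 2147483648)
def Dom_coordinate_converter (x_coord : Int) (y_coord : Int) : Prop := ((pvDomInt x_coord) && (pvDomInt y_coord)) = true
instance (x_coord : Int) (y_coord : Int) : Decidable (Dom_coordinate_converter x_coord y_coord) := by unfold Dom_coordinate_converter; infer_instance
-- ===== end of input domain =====

-- ===== PORT A =====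
-- Header: B replaces the two scans over the line-start list with a closed-form
-- bounds check + integer division per coordinate (objective: simpler).
def coordinate_converter (x_coord : Int) (y_coord : Int) : Int × Int :=
  let range : List Int := [110, 270, 430]
  let i_coord : Int := 50
  let j_coord : Int := 50
  let i_coord := (PySem.List.enumerate range).foldl
    (fun acc p => if p.2 ≤ x_coord ∧ x_coord ≤ p.2 + 159 then (p.1 : Int) else acc) i_coord
  let j_coord := (PySem.List.enumerate range).foldl
    (fun acc p => if p.2 ≤ y_coord ∧ y_coord ≤ p.2 + 159 then (p.1 : Int) else acc) j_coord
  (i_coord, j_coord)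

-- ===== PORT B =====
def pvCell (c : Int) : Int :=
  if 110 ≤ c ∧ c ≤ 589 then PySem.Int.floordiv (c - 110) 160 else 50

def coordinate_converter_alt (x_coord : Int) (y_coord : Int) : Int × Int :=
  (pvCell x_coord, pvCell y_coord)

-- ===== PRECONDITION & SPEC =====
def Spec_coordinate_converter (x_coord : Int) (y_coord : Int) (out : Int × Int) : Prop := out = coordinate_converter_alt x_coord y_coord
instance (x_coord : Int) (y_coord : Int) (out : Int × Int) : Decidable (Spec_coordinate_converter x_coord y_coord out) := by unfold Spec_coordinate_converter; infer_instance

-- ===== CLAIM (what is proved, stated in full; the proofs are below) =====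
def Claim_equal_coordinate_converter : Prop := ∀ (x_coord : Int) (y_coord : Int), Dom_coordinate_converter x_coord y_coord → Spec_coordinate_converter x_coord y_coord (coordinate_converter x_coord y_coord)

-- ===== LEMMAS AND PROOFS =====

-- ===== VERDICT (by name: the statement is the Claim_ definition above) =====
theorem pvCell_eq (c : Int) :
    (PySem.List.enumerate [(110:Int), 270, 430]).foldl
      (fun acc p => if p.2 ≤ c ∧ c ≤ p.2 + 159 then (p.1 : Int) else acc) 50 = pvCell c := by
  simp only [PySem.List.enumerate, pvCell, List.foldl]
  split_ifs <;> first
    | omega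
    | exact ((PySem.Int.floordiv_eq_iff_of_pos (by omega)).mpr (by omega)).symm

theorem coordinate_converter_spec : Claim_equal_coordinate_converter := by
  intro x y _
  unfold Spec_coordinate_converter coordinate_converter coordinate_converter_alt
  simp only [← pvCell_eq]
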